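-- pv_equiv track=rewrite | github.com/algorithm-python-coding-test/Algorithm-Python | choiheejin/1-23/문자열압축.py | cutString
-- ===== SOURCE A (Python) =====
-- def cutString(s, i):
--     # 완성된 문자열
--     answer = ''
--     # 똑같은 문자열이 시작되는 지점
--     index = 0
--     # 반복되는 횟수
--     repeat = 1
--     # 다음 단위까지의 문자열 인덱스가 실제 인덱스를 넘지 않는지 확인
--     while index + (repeat + 1) * i <= len(s):
--         # 현재 단위와 다음 단위가 같은 지 비교
--         if s[index + (repeat - 1) * i : index + repeat * i] == s[index + repeat * i : index + (repeat + 1) * i]: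
--             # 같다면 repeat +1
--             repeat += 1
--         else:
--             if repeat > 1:
--                 # 반복이 지속되다가 끝났다면 여태 반복된 횟수와 함꼐 반복된 단위를 answer에 더함
--                 answer = answer + str(repeat) + s[index : index + i]
--                 # index와 repeat 초기화
--                 index = index + (repeat) * i
--                 repeat = 1
--             else:
--                 # 반복이 하나도 되지 않았다면, answer에 그 단위를 그대로 넣고
--                 answer = answer + s[index:index + i]
--                 # index 초기화
--                 index = index + i
--     # 다음 단위가 실제 문자열 길이보다 커졌을 경우에 대비하여 answer에 추가되지 못한 문자열을 뒤에 더해줌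
--     if repeat > 1:
--         answer = answer + str(repeat) + s[index:index + i] + s[index + repeat * i:]
--     else:
--         answer = answer + s[index:]
--
--     return answer
-- ===== SOURCE B (Python) =====
-- def cutString(s, i):
--     # chunk into fixed-size units (short trailing chunk included), then group equal runs
--     chunks = [s[j:j + i] for j in range(0, len(s), i)]
--     parts = []
--     prev = None
--     count = 0
--     for c in chunks:
--         if c == prev:
--             count += 1
--         else:
--             if prev is not None:
--                 parts.append((str(count) if count > 1 else '') + prev)
--             prev = c
--             count = 1
--     if prev is not None:
--         parts.append((str(count) if count > 1 else '') + prev)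
--     return ''.join(parts)
-- ===== Notes on version B (the rewrite author's own statement) =====
-- stated objective: simpler
-- what changed: Replaced A's index/repeat slice-arithmetic while-loop and its manual trailing fixup with a single pass: build the list of fixed-size chunks, then group consecutive equal chunks with a (prev, count) accumulator and join the emitted parts.
import Mathlib
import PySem

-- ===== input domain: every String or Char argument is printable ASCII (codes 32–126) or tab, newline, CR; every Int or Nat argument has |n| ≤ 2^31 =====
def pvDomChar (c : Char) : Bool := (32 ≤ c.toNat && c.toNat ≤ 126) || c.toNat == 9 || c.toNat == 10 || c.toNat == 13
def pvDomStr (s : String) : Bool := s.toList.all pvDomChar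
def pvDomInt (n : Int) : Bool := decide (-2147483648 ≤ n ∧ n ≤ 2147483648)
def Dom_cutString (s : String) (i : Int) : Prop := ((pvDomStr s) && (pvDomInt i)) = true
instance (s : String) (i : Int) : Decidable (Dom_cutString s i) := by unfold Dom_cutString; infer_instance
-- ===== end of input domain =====

-- B replaces A's index/repeat slice-arithmetic while-loop (with its manual trailing fixup)
-- by a chunk-list + run-grouping single pass; objective: simpler (no speed claim).


-- ===== PORT A =====
-- A's while loop, transliterated with fuel; fuel s.length + 1 exceeds the number of
-- iterations whenever 1 ≤ i (each step increases index + repeat*i by at least i),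
-- so the fuel-0 case is unreachable on Pre_ (Python's loop diverges for i ≤ 0).
def cutStringLoop (cs : List Char) (i : Int) : Nat → List Char → Int → Int → List Char
  | 0, ans, idx, rep =>
      if 1 < rep then
        ans ++ PySem.Int.toChars rep ++ PySem.List.slice cs (some idx) (some (idx + i))
            ++ PySem.List.slice cs (some (idx + rep * i)) none
      else ans ++ PySem.List.slice cs (some idx) none
  | fuel+1, ans, idx, rep =>
      if idx + (rep + 1) * i ≤ (cs.length : Int) then
        if PySem.List.slice cs (some (idx + (rep - 1) * i)) (some (idx + rep * i))
             = PySem.List.slice cs (some (idx + rep * i)) (some (idx + (rep + 1) * i)) then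
          cutStringLoop cs i fuel ans idx (rep + 1)
        else if 1 < rep then
          cutStringLoop cs i fuel
            (ans ++ PySem.Int.toChars rep ++ PySem.List.slice cs (some idx) (some (idx + i)))
            (idx + rep * i) 1
        else
          cutStringLoop cs i fuel (ans ++ PySem.List.slice cs (some idx) (some (idx + i))) (idx + i) 1
      else
        if 1 < rep then
          ans ++ PySem.Int.toChars rep ++ PySem.List.slice cs (some idx) (some (idx + i))
              ++ PySem.List.slice cs (some (idx + rep * i)) none
        else ans ++ PySem.List.slice cs (some idx) none

def cutString (s : String) (i : Int) : String :=
  String.ofList (cutStringLoop s.toList i (s.toList.length + 1) [] 0 1)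

-- ===== PORT B =====
-- '' prefix vs str(count) prefix of one emitted group
def emitPart (count : Int) (p : List Char) : List Char :=
  (if 1 < count then PySem.Int.toChars count else []) ++ p

-- body of Source B's for-loop over the chunks, state (parts, prev, count)
def cutStringAltStep (st : List (List Char) × Option (List Char) × Int) (c : List Char) :
    List (List Char) × Option (List Char) × Int :=
  if some c = st.2.1 then (st.1, st.2.1, st.2.2 + 1)
  else
    match st.2.1 with
    | none => (st.1, some c, 1)
    | some p => (st.1 ++ [emitPart st.2.2 p], some c, 1)

-- Source B's trailing 'if prev is not None' flush followed by ''.join(parts)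
def finalizeB (st : List (List Char) × Option (List Char) × Int) : List Char :=
  (match st.2.1 with
   | none => st.1
   | some p => st.1 ++ [emitPart st.2.2 p]).flatten

def cutString_alt (s : String) (i : Int) : String :=
  let cs := s.toList
  let chunks := (PySem.List.pyRange 0 (cs.length : Int) i).map
      (fun j => PySem.List.slice cs (some j) (some (j + i)))
  String.ofList (finalizeB (chunks.foldl cutStringAltStep ([], none, 0)))

-- ===== PRECONDITION & SPEC =====
-- Pre_ excludes i ≤ 0: there Python's A loops forever (i = 0 also makes B's range() raise).
def Pre_cutString (_s : String) (i : Int) : Prop := 1 ≤ i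
instance (s : String) (i : Int) : Decidable (Pre_cutString s i) := by unfold Pre_cutString; infer_instance

def pvWitness_cutString : String × Int := ("aabbaccc", 2)

def Spec_cutString (s : String) (i : Int) (out : String) : Prop := out = cutString_alt s i
instance (s : String) (i : Int) (out : String) : Decidable (Spec_cutString s i out) := by unfold Spec_cutString; infer_instance

-- ===== CLAIM (what is proved, stated in full; the proofs are below) =====
def Claim_equal_cutString : Prop := ∀ (s : String) (i : Int), Dom_cutString s i → Pre_cutString s i → Spec_cutString s i (cutString s i)

-- ===== LEMMAS AND PROOFS =====

-- chunk number t of cs cut in units of i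
def chunk (cs : List Char) (i t : Nat) : List Char := (cs.drop (t * i)).take i

-- number of chunks, ⌈len/i⌉
def numChunks (len i : Nat) : Nat := (len + i - 1) / i

-- the chunks from number t on
def chunkTail (cs : List Char) (i t m : Nat) : List (List Char) :=
  (List.range (m - t)).map (fun u => chunk cs i (t + u))

-- run-length grouping of a list of chunks, a pending group (p, count) in hand
def rleAux (p : List Char) (count : Int) : List (List Char) → List Char
  | [] => emitPart count p
  | c :: rest => if c = p then rleAux p (count + 1) rest else emitPart count p ++ rleAux c 1 rest

theorem foldB_eq (l : List (List Char)) : ∀ (parts : List (List Char)) (p : List Char) (count : Int),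
    finalizeB (l.foldl cutStringAltStep (parts, some p, count)) = parts.flatten ++ rleAux p count l := by
  induction l with
  | nil => intro parts p count; simp [finalizeB, rleAux]
  | cons c rest ih =>
    intro parts p count
    simp only [List.foldl_cons, cutStringAltStep]
    by_cases h : c = p
    · simp [h, ih, rleAux]
    · simp [h, ih, rleAux, List.flatten_append]

-- arithmetic facts about numChunks = ⌈len/i⌉
theorem nc_le_of_mul_le (len i t : Nat) (hi : 1 ≤ i) (h : t * i ≤ len) : t ≤ numChunks len i := by
  unfold numChunks
  rw [Nat.le_div_iff_mul_le (by omega)]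
  omega

theorem nc_ge_succ (len i t : Nat) (hi : 1 ≤ i) (h : (t + 1) * i ≤ len) : t + 1 ≤ numChunks len i := by
  unfold numChunks
  rw [Nat.le_div_iff_mul_le (by omega)]
  omega

theorem nc_eq_of_exact (len i t : Nat) (hi : 1 ≤ i) (h : len = t * i) : numChunks len i = t := by
  subst h
  unfold numChunks
  have h1 : t * i + i - 1 = i * t + (i - 1) := by
    have := Nat.mul_comm t i; omega
  rw [h1, Nat.mul_add_div (by omega), Nat.div_eq_of_lt (by omega)]
  omega

theorem nc_eq_of_partial (len i t : Nat) (hi : 1 ≤ i) (h1 : t * i < len) (h2 : len < (t + 1) * i) :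
    numChunks len i = t + 1 := by
  have hlo : t + 1 ≤ numChunks len i := by
    unfold numChunks
    rw [Nat.le_div_iff_mul_le (by omega)]
    have e : (t + 1) * i = t * i + i := by ring
    omega
  have hhi : numChunks len i < t + 2 := by
    unfold numChunks
    rw [Nat.div_lt_iff_lt_mul (by omega)]
    have e : (t + 2) * i = (t + 1) * i + i := by ring
    omega
  omega

theorem nc_le_len (len i : Nat) (hi : 1 ≤ i) : numChunks len i ≤ len := by
  unfold numChunks
  have hm : len ≤ i * len := Nat.le_mul_of_pos_left len (by omega)
  have h1 : len + i - 1 ≤ i * len + (i - 1) := by omega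
  calc (len + i - 1) / i ≤ (i * len + (i - 1)) / i := Nat.div_le_div_right h1
    _ = len + (i - 1) / i := Nat.mul_add_div (by omega) _ _
    _ = len := by rw [Nat.div_eq_of_lt (by omega)]; omega

-- chunkTail unfolding
theorem chunkTail_nil (cs : List Char) (i t m : Nat) (h : m ≤ t) : chunkTail cs i t m = [] := by
  unfold chunkTail
  rw [Nat.sub_eq_zero_of_le h]
  rfl

theorem chunkTail_cons (cs : List Char) (i t m : Nat) (h : t < m) :
    chunkTail cs i t m = chunk cs i t :: chunkTail cs i (t + 1) m := by
  unfold chunkTail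
  have e : m - t = (m - (t + 1)) + 1 := by omega
  rw [e, List.range_succ_eq_map, List.map_cons, List.map_map]
  refine congrArg₂ _ (by simp) ?_
  refine List.map_congr_left fun u _ => ?_
  simp [Function.comp]
  ring_nf

-- chunk shape facts
theorem chunk_len_full (cs : List Char) (i t : Nat) (h : (t + 1) * i ≤ cs.length) :
    (chunk cs i t).length = i := by
  have e : (t + 1) * i = t * i + i := by ring
  simp [chunk]
  omega

theorem chunk_partial (cs : List Char) (i t : Nat) (h : cs.length ≤ t * i + i) :
    chunk cs i t = cs.drop (t * i) := by
  unfold chunk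
  exact List.take_of_length_le (by simp; omega)

theorem drop_chunk_split (cs : List Char) (i t : Nat) :
    cs.drop (t * i) = chunk cs i t ++ cs.drop ((t + 1) * i) := by
  unfold chunk
  have h := List.take_append_drop i (cs.drop (t * i))
  rw [List.drop_drop] at h
  rw [show (t + 1) * i = t * i + i from by ring, h]

-- a slice of one unit is a chunk
theorem slice_chunk (cs : List Char) (i t : Nat) :
    PySem.List.slice cs (some ((t * i : Nat) : Int)) (some ((t * i + i : Nat) : Int)) = chunk cs i t := by
  have h := PySem.List.slice_natCast_add cs (t * i) i
  rw [show ((t * i + i : Nat) : Int) = ((t * i : Nat) : Int) + (i : Nat) by push_cast; ring]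
  exact h

theorem loopA_eq (cs : List Char) (i : Nat) (hi : 1 ≤ i) :
    ∀ (fuel k r : Nat) (ans : List Char), 1 ≤ r →
    (k + r) * i ≤ cs.length →
    (∀ j, j < r → chunk cs i (k + j) = chunk cs i k) →
    numChunks cs.length i < fuel + k + r →
    cutStringLoop cs (i : Int) fuel ans ((k * i : Nat) : Int) ((r : Nat) : Int)
      = ans ++ rleAux (chunk cs i k) (r : Int) (chunkTail cs i (k + r) (numChunks cs.length i)) := by
  intro fuel
  induction fuel with
  | zero =>
    intro k r ans hr hfull hrun hfuel
    exact absurd (nc_le_of_mul_le _ _ _ hi hfull) (by omega)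
  | succ fuel ih =>
    intro k r ans hr hfull hrun hfuel
    obtain ⟨r', rfl⟩ : ∃ r'', r = r'' + 1 := ⟨r - 1, by omega⟩
    have hfull' : (k + r' + 1) * i ≤ cs.length := by
      have e : (k + (r' + 1)) * i = (k + r' + 1) * i := by ring
      omega
    have sU : PySem.List.slice cs (some ((k * i : Nat) : Int))
        (some (((k * i : Nat) : Int) + ((i : Nat) : Int))) = chunk cs i k := by
      rw [show (((k * i : Nat) : Int) + ((i : Nat) : Int)) = ((k * i + i : Nat) : Int) from by push_cast; ring]
      exact slice_chunk cs i k
    have sA : PySem.List.slice cs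
        (some (((k * i : Nat) : Int) + (((r' + 1 : Nat) : Int) - 1) * ((i : Nat) : Int)))
        (some (((k * i : Nat) : Int) + ((r' + 1 : Nat) : Int) * ((i : Nat) : Int)))
        = chunk cs i (k + r') := by
      rw [show (((k * i : Nat) : Int) + (((r' + 1 : Nat) : Int) - 1) * ((i : Nat) : Int))
            = (((k + r') * i : Nat) : Int) from by push_cast; ring,
          show (((k * i : Nat) : Int) + ((r' + 1 : Nat) : Int) * ((i : Nat) : Int))
            = (((k + r') * i + i : Nat) : Int) from by push_cast; ring]
      exact slice_chunk cs i (k + r')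
    have sB : PySem.List.slice cs
        (some (((k * i : Nat) : Int) + ((r' + 1 : Nat) : Int) * ((i : Nat) : Int)))
        (some (((k * i : Nat) : Int) + (((r' + 1 : Nat) : Int) + 1) * ((i : Nat) : Int)))
        = chunk cs i (k + r' + 1) := by
      rw [show (((k * i : Nat) : Int) + ((r' + 1 : Nat) : Int) * ((i : Nat) : Int))
            = (((k + r' + 1) * i : Nat) : Int) from by push_cast; ring,
          show (((k * i : Nat) : Int) + (((r' + 1 : Nat) : Int) + 1) * ((i : Nat) : Int))
            = (((k + r' + 1) * i + i : Nat) : Int) from by push_cast; ring]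
      exact slice_chunk cs i (k + r' + 1)
    have hck : chunk cs i (k + r') = chunk cs i k := by
      have := hrun r' (by omega)
      rwa [show k + r' = k + r' from rfl] at this
    simp only [cutStringLoop]
    rw [sA, sB, sU]
    by_cases hcond : (k + r' + 2) * i ≤ cs.length
    · rw [if_pos (show (((k * i : Nat) : Int) + (((r' + 1 : Nat) : Int) + 1) * ((i : Nat) : Int)
              ≤ ((cs.length : Nat) : Int)) from by
            rw [show (((k * i : Nat) : Int) + (((r' + 1 : Nat) : Int) + 1) * ((i : Nat) : Int))
                  = (((k + r' + 2) * i : Nat) : Int) from by push_cast; ring]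
            exact_mod_cast hcond)]
      have hm : k + r' + 2 ≤ numChunks cs.length i :=
        nc_ge_succ _ _ _ hi (by have e : (k + r' + 1 + 1) * i = (k + r' + 2) * i := (by ring); omega)
      have hct : chunkTail cs i (k + (r' + 1)) (numChunks cs.length i)
          = chunk cs i (k + r' + 1) :: chunkTail cs i (k + r' + 2) (numChunks cs.length i) := by
        rw [show k + (r' + 1) = k + r' + 1 from by ring]
        exact chunkTail_cons _ _ _ _ (by omega)
      by_cases heq : chunk cs i (k + r' + 1) = chunk cs i k
      · rw [if_pos (hck.trans heq.symm)]
        rw [show (((r' + 1 : Nat) : Int) + 1) = ((r' + 2 : Nat) : Int) from by push_cast; ring]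
        have := ih k (r' + 2) ans (by omega)
          (by have e : (k + (r' + 2)) * i = (k + r' + 2) * i := (by ring); omega)
          (by intro j hj
              by_cases hj' : j = r' + 1
              · subst hj'; rw [show k + (r' + 1) = k + r' + 1 from by ring]; exact heq
              · exact hrun j (by omega))
          (by omega)
        rw [this, hct]
        simp only [rleAux, if_pos heq]
        rw [show k + (r' + 2) = k + r' + 2 from by ring,
            show ((r' + 1 : Nat) : Int) + 1 = ((r' + 2 : Nat) : Int) from by push_cast; ring]
      · rw [if_neg (by rw [hck]; exact fun h => heq h.symm)]
        rw [hct]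
        simp only [rleAux, if_neg heq]
        by_cases hr1 : 0 < r'
        · rw [if_pos (show (1 : Int) < ((r' + 1 : Nat) : Int) from by exact_mod_cast Nat.lt_add_of_pos_left hr1)]
          rw [show (((k * i : Nat) : Int) + ((r' + 1 : Nat) : Int) * ((i : Nat) : Int))
                = (((k + r' + 1) * i : Nat) : Int) from by push_cast; ring,
              show (1 : Int) = ((1 : Nat) : Int) from by simp]
          have := ih (k + r' + 1) 1 (ans ++ PySem.Int.toChars ((r' + 1 : Nat) : Int) ++ chunk cs i k)
            (by omega)
            (by have e : (k + r' + 1 + 1) * i = (k + r' + 2) * i := (by ring); omega)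
            (by intro j hj; have : j = 0 := by omega
                subst this; rfl)
            (by omega)
          rw [this]
          simp only [emitPart,
            if_pos (show (1 : Int) < ((r' + 1 : Nat) : Int) from by exact_mod_cast Nat.lt_add_of_pos_left hr1)]
          rw [show k + r' + 1 + 1 = k + r' + 2 from by ring,
              show ((1 : Nat) : Int) = (1 : Int) from by simp]
          simp [List.append_assoc]
        · rw [if_neg (show ¬ (1 : Int) < ((r' + 1 : Nat) : Int) from by
              have : r' = 0 := by omega
              subst this; simp)]
          have hr0 : r' = 0 := by omega
          subst hr0
          rw [show (((k * i : Nat) : Int) + ((i : Nat) : Int)) = (((k + 0 + 1) * i : Nat) : Int) from by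
                push_cast; ring,
              show (1 : Int) = ((1 : Nat) : Int) from by simp]
          have := ih (k + 0 + 1) 1 (ans ++ chunk cs i k) (by omega)
            (by have e : (k + 0 + 1 + 1) * i = (k + 0 + 2) * i := (by ring); omega)
            (by intro j hj; have : j = 0 := by omega
                subst this; rfl)
            (by omega)
          rw [this]
          simp only [emitPart, if_neg (show ¬ (1 : Int) < ((0 + 1 : Nat) : Int) from by simp)]
          rw [show ((1 : Nat) : Int) = (1 : Int) from by simp]
          simp [List.append_assoc]
    · rw [if_neg (show ¬ (((k * i : Nat) : Int) + (((r' + 1 : Nat) : Int) + 1) * ((i : Nat) : Int)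
              ≤ ((cs.length : Nat) : Int)) from by
            rw [show (((k * i : Nat) : Int) + (((r' + 1 : Nat) : Int) + 1) * ((i : Nat) : Int))
                  = (((k + r' + 2) * i : Nat) : Int) from by push_cast; ring]
            exact_mod_cast hcond)]
      have hlen_lt : cs.length < (k + r' + 2) * i := by omega
      have sE : PySem.List.slice cs
          (some (((k * i : Nat) : Int) + ((r' + 1 : Nat) : Int) * ((i : Nat) : Int))) none
          = cs.drop ((k + r' + 1) * i) := by
        rw [show (((k * i : Nat) : Int) + ((r' + 1 : Nat) : Int) * ((i : Nat) : Int))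
              = (((k + r' + 1) * i : Nat) : Int) from by push_cast; ring]
        rw [PySem.List.slice_from cs (by positivity), Int.toNat_natCast]
      have sF : PySem.List.slice cs (some ((k * i : Nat) : Int)) none = cs.drop (k * i) := by
        rw [PySem.List.slice_from cs (by positivity), Int.toNat_natCast]
      rw [sE, sF]
      by_cases hE : cs.length = (k + r' + 1) * i
      · have hm : numChunks cs.length i = k + r' + 1 := nc_eq_of_exact _ _ _ hi hE
        have hct : chunkTail cs i (k + (r' + 1)) (numChunks cs.length i) = [] := by
          apply chunkTail_nil; omega
        rw [hct]
        have hdropnil : cs.drop ((k + r' + 1) * i) = [] := by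
          apply List.drop_eq_nil_of_le; omega
        simp only [rleAux]
        by_cases hr1 : 0 < r'
        · rw [if_pos (show (1 : Int) < ((r' + 1 : Nat) : Int) from by exact_mod_cast Nat.lt_add_of_pos_left hr1)]
          simp only [emitPart,
            if_pos (show (1 : Int) < ((r' + 1 : Nat) : Int) from by exact_mod_cast Nat.lt_add_of_pos_left hr1)]
          rw [hdropnil]
          simp [List.append_assoc]
        · have hr0 : r' = 0 := by omega
          subst hr0
          rw [if_neg (show ¬ (1 : Int) < ((0 + 1 : Nat) : Int) from by simp)]
          simp only [emitPart, if_neg (show ¬ (1 : Int) < ((0 + 1 : Nat) : Int) from by simp)]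
          have hsplit := drop_chunk_split cs i k
          rw [show (k + 1) * i = (k + 0 + 1) * i from by ring] at hsplit
          rw [hsplit, hdropnil]
          simp
      · have hlt : (k + r' + 1) * i < cs.length := by omega
        have hm : numChunks cs.length i = k + r' + 2 :=
          nc_eq_of_partial _ _ _ hi hlt (by rw [show k + r' + 1 + 1 = k + r' + 2 from by omega]; omega)
        have hct : chunkTail cs i (k + (r' + 1)) (numChunks cs.length i)
            = chunk cs i (k + r' + 1) :: chunkTail cs i (k + r' + 2) (numChunks cs.length i) := by
          rw [show k + (r' + 1) = k + r' + 1 from by ring]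
          exact chunkTail_cons _ _ _ _ (by omega)
        have hpart : chunk cs i (k + r' + 1) = cs.drop ((k + r' + 1) * i) := by
          apply chunk_partial
          have e : (k + r' + 2) * i = (k + r' + 1) * i + i := by ring
          omega
        have hlenp : (chunk cs i k).length = i := by
          apply chunk_len_full
          have h1 : (k + 1) * i ≤ (k + r' + 1) * i := Nat.mul_le_mul_right i (by omega)
          omega
        have hne : ¬ (chunk cs i (k + r' + 1) = chunk cs i k) := by
          intro h
          have h1 : (chunk cs i (k + r' + 1)).length = i := by rw [h, hlenp]
          rw [hpart] at h1
          simp at h1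
          have e2 : (k + r' + 2) * i = (k + r' + 1) * i + i := by ring
          omega
        rw [hct]
        simp only [rleAux, if_neg hne]
        by_cases hr1 : 0 < r'
        · rw [if_pos (show (1 : Int) < ((r' + 1 : Nat) : Int) from by exact_mod_cast Nat.lt_add_of_pos_left hr1)]
          simp only [emitPart,
            if_pos (show (1 : Int) < ((r' + 1 : Nat) : Int) from by exact_mod_cast Nat.lt_add_of_pos_left hr1)]
          rw [chunkTail_nil cs i (k + r' + 2) _ (by omega), hpart]
          simp [rleAux, emitPart, List.append_assoc]
        · have hr0 : r' = 0 := by omega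
          subst hr0
          rw [if_neg (show ¬ (1 : Int) < ((0 + 1 : Nat) : Int) from by simp)]
          simp only [emitPart, if_neg (show ¬ (1 : Int) < ((0 + 1 : Nat) : Int) from by simp)]
          have hsplit := drop_chunk_split cs i k
          rw [show (k + 1) * i = (k + 0 + 1) * i from by ring] at hsplit
          rw [hsplit, chunkTail_nil cs i (k + 0 + 2) _ (by omega), hpart]
          simp [rleAux, emitPart]

-- B's chunk comprehension is the full chunk list
theorem chunkList_eq (cs : List Char) (iN : Nat) (hi : 1 ≤ iN) :
    (PySem.List.pyRange 0 (cs.length : Int) (iN : Int)).map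
        (fun j => PySem.List.slice cs (some j) (some (j + (iN : Int))))
      = chunkTail cs iN 0 (numChunks cs.length iN) := by
  rw [PySem.List.pyRange_of_pos 0 (cs.length : Int) (by exact_mod_cast hi)]
  by_cases hlen : cs.length = 0
  · rw [hlen]
    rw [if_neg (by simp)]
    rw [chunkTail_nil cs iN 0 _ (by
      unfold numChunks
      rw [show 0 + iN - 1 = iN - 1 from by omega, Nat.div_eq_of_lt (by omega)])]
    simp
  · rw [if_pos (by exact_mod_cast Nat.pos_of_ne_zero hlen)]
    have hn : (((cs.length : Int) - 0 + (iN : Int) - 1) / (iN : Int)).toNat = numChunks cs.length iN := by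
      rw [show ((cs.length : Int) - 0 + (iN : Int) - 1) = ((cs.length + iN - 1 : Nat) : Int) from by omega,
          ← Int.natCast_div, Int.toNat_natCast]
      rfl
    rw [hn]
    unfold chunkTail
    rw [Nat.sub_zero, List.map_map]
    refine List.map_congr_left fun u _ => ?_
    simp only [Function.comp]
    rw [show ((0 : Int) + (iN : Int) * (u : Int)) = ((u * iN : Nat) : Int) from by push_cast; ring,
        show (((u * iN : Nat) : Int) + (iN : Int)) = ((u * iN + iN : Nat) : Int) from by push_cast; ring]
    rw [slice_chunk cs iN u]
    simp

-- ===== VERDICT (by name: the statement is the Claim_ definition above) =====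
theorem cutString_spec : Claim_equal_cutString := by
  intro s i hdom hpre
  unfold Spec_cutString
  unfold Pre_cutString at hpre
  obtain ⟨iN, rfl⟩ : ∃ n : Nat, i = (n : Int) :=
    ⟨i.toNat, (Int.toNat_of_nonneg (le_trans (by norm_num) hpre)).symm⟩
  have hiN : 1 ≤ iN := by exact_mod_cast hpre
  simp only [cutString, cutString_alt]
  rw [chunkList_eq s.toList iN hiN]
  by_cases hlen : s.toList.length = 0
  · have hnil : s.toList = [] := List.eq_nil_of_length_eq_zero hlen
    rw [chunkTail_nil s.toList iN 0 _ (by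
      unfold numChunks
      rw [hlen, show 0 + iN - 1 = iN - 1 from by omega, Nat.div_eq_of_lt (by omega)])]
    simp only [List.foldl_nil, finalizeB]
    rw [hnil]
    simp only [cutStringLoop]
    rw [if_neg (by push_cast; simp; omega)]
    rw [if_neg (by norm_num)]
    rw [PySem.List.slice_from [] (by norm_num)]
    simp
  · by_cases hfit : iN ≤ s.toList.length
    · have hA := loopA_eq s.toList iN hiN (s.toList.length + 1) 0 1 [] (by omega)
        (by rw [show (0 + 1) * iN = iN from by ring]; omega)
        (by intro j hj; have : j = 0 := by omega
            subst this; rfl)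
        (by have := nc_le_len s.toList.length iN hiN; omega)
      simp only [Nat.zero_mul, Nat.cast_zero, Nat.cast_one, Nat.zero_add] at hA
      rw [hA]
      have hm1 : 1 ≤ numChunks s.toList.length iN :=
        nc_ge_succ s.toList.length iN 0 hiN (by rw [show (0 + 1) * iN = iN from by ring]; omega)
      rw [chunkTail_cons s.toList iN 0 _ (by omega)]
      simp only [List.foldl_cons]
      rw [show cutStringAltStep ([], none, 0) (chunk s.toList iN 0) = ([], some (chunk s.toList iN 0), 1) from by
            simp [cutStringAltStep]]
      rw [foldB_eq]
      simp
    · have hlt : s.toList.length < iN := by omega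
      simp only [cutStringLoop]
      rw [if_neg (by push_cast; omega)]
      rw [if_neg (by norm_num)]
      rw [PySem.List.slice_from s.toList (by norm_num)]
      have hm1 : numChunks s.toList.length iN = 1 :=
        nc_eq_of_partial s.toList.length iN 0 hiN (by omega)
          (by rw [show (0 + 1) * iN = iN from by ring]; omega)
      rw [hm1, chunkTail_cons s.toList iN 0 1 (by omega), chunkTail_nil s.toList iN 1 1 (by omega)]
      have hchunk0 : chunk s.toList iN 0 = s.toList := by
        unfold chunk
        rw [Nat.zero_mul, List.drop_zero]
        exact List.take_of_length_le (by omega)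
      rw [hchunk0]
      simp only [List.foldl_cons, List.foldl_nil]
      rw [show cutStringAltStep ([], none, 0) s.toList = ([], some s.toList, 1) from by simp [cutStringAltStep]]
      simp [finalizeB, emitPart]
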